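-- pv_equiv track=rewrite | github.com/taesookim0412/PythonAlgorithms | 2020/06/HackerRankHackTheInterview/2TheXorProblem.py | maxXorValue
-- ===== SOURCE A (Python) =====
-- def maxXorValue(x,k) -> str:
--     num = []
--     x = str(x)
--     for i in range(len(x)):
--         a = x[i]
--         if a == '0' and k>0:
--             num.append('1')
--             k-=1
--         else:
--             num.append('0')
--     return ''.join(num)
-- ===== SOURCE B (Python) =====
-- def maxXorValue(x, k) -> str:
--     s = str(x)
--     parts = s.split('0', min(max(k, 0), s.count('0')))
--     return '1'.join('0' * len(p) for p in parts)
-- ===== Notes on version B (the rewrite author's own statement) =====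
-- stated objective: alternative
-- what changed: Replaced A's single stateful sweep that decrements a flip budget per character with a delimiter-splitting algorithm: split str(x) at the first min(max(k,0), s.count('0')) zeros via str.split with maxsplit, render each chunk as '0'*len, and rejoin with '1' (each removed separator is exactly one flipped zero).
import Mathlib
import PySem

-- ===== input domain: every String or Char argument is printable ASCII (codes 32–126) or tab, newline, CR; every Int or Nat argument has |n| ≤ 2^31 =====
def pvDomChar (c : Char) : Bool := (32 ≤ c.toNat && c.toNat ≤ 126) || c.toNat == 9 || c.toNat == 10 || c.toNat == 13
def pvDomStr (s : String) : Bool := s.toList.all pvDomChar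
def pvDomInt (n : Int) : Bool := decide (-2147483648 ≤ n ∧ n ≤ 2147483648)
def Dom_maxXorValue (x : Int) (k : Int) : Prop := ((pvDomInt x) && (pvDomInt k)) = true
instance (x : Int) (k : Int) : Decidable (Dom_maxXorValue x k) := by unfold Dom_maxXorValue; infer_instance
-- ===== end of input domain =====

-- B replaces A's stateful budget-decrementing character sweep with delimiter splitting:
-- split str(x) at the first min(max(k,0), count) zeros and rejoin the chunks with '1' (alternative, same cost).

-- ===== PORT A =====
-- A: one pass over str(x), appending '1' while a mutable budget k is positive at a '0', else '0'.
def maxXorValue (x : Int) (k : Int) : String :=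
  let s := PySem.Int.toChars x
  let r := (PySem.List.pyRange 0 (s.length : Int) 1).foldl
    (fun (st : List Char × Int) i =>
      let a := PySem.List.pyGetD s i ' '
      if a = '0' ∧ st.2 > 0 then (st.1 ++ ['1'], st.2 - 1) else (st.1 ++ ['0'], st.2))
    ([], k)
  String.ofList r.1

-- ===== PORT B =====
-- B: s.split('0', m) with m = min(max(k,0), s.count('0')), then '1'.join('0'*len(p) for p in parts).
def maxXorValue_alt (x : Int) (k : Int) : String :=
  let s := PySem.Int.toChars x
  let parts := PySem.Chars.splitOnMax s ['0'] (min (max k 0) (PySem.Chars.count s ['0'] : Int))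
  String.ofList (PySem.Chars.join ['1'] (parts.map (fun p => PySem.List.pyRepeat ['0'] (p.length : Int))))

-- ===== PRECONDITION & SPEC =====
def Spec_maxXorValue (x : Int) (k : Int) (out : String) : Prop := out = maxXorValue_alt x k
instance (x : Int) (k : Int) (out : String) : Decidable (Spec_maxXorValue x k out) := by unfold Spec_maxXorValue; infer_instance

-- ===== CLAIM (what is proved, stated in full; the proofs are below) =====
def Claim_equal_maxXorValue : Prop := ∀ (x : Int) (k : Int), Dom_maxXorValue x k → Spec_maxXorValue x k (maxXorValue x k)

-- ===== LEMMAS AND PROOFS =====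

-- common recursive characterisation of the produced character list
def pvBuild : List Char → Int → List Char
  | [], _ => []
  | c :: t, k => if c = '0' ∧ k > 0 then '1' :: pvBuild t (k - 1) else '0' :: pvBuild t k

-- A's fold produces pvBuild
theorem pvFoldA (l : List Char) : ∀ (acc : List Char) (k : Int),
    (l.foldl (fun (st : List Char × Int) a =>
      if a = '0' ∧ st.2 > 0 then (st.1 ++ ['1'], st.2 - 1) else (st.1 ++ ['0'], st.2)) (acc, k)).1
      = acc ++ pvBuild l k := by
  induction l with
  | nil => intro acc k; simp [pvBuild]
  | cons c t ih =>
      intro acc k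
      by_cases h : c = '0' ∧ k > 0
      · simp [List.foldl_cons, h, pvBuild, ih]
      · simp [List.foldl_cons, h, pvBuild, ih]

-- pure model of s.split('0', m): split l at the first m occurrences of '0'
def pvSplit : List Char → Nat → List (List Char)
  | l, 0 => [l]
  | [], _ + 1 => [[]]
  | c :: t, m + 1 =>
      if c = '0' then [] :: pvSplit t m
      else
        match pvSplit t (m + 1) with
        | p :: ps => (c :: p) :: ps
        | [] => [[c]]

theorem pvSplit_ne_nil (l : List Char) (m : Nat) : pvSplit l m ≠ [] := by
  induction l generalizing m with
  | nil => cases m <;> simp [pvSplit]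
  | cons c t ih =>
      cases m with
      | zero => simp [pvSplit]
      | succ m =>
          by_cases hc : c = '0'
          · simp [pvSplit, hc]
          · simp only [pvSplit, if_neg hc]
            cases h : pvSplit t (m + 1) <;> simp

-- the fuelled splitter of PySem.Chars.splitOnMax, with singleton separator, computes pvSplit
theorem pvGoSpec (l : List Char) : ∀ (fuel m : Nat) (cur : List Char) (acc : List (List Char)),
    l.length < fuel →
    PySem.Chars.splitOnMax.go ['0'] fuel m l cur acc
      = acc.reverse ++ ((cur.reverse ++ (pvSplit l m).headI) :: (pvSplit l m).tail) := by
  induction l with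
  | nil =>
      intro fuel m cur acc hf
      cases fuel with
      | zero => omega
      | succ fuel =>
          rw [PySem.Chars.splitOnMax.go.eq_def]
          cases m <;> simp [pvSplit]
  | cons c t ih =>
      intro fuel m cur acc hf
      cases fuel with
      | zero => simp at hf
      | succ fuel =>
          have ht : t.length < fuel := by simp at hf; omega
          rw [PySem.Chars.splitOnMax.go.eq_def]
          cases m with
          | zero => simp [pvSplit]
          | succ m =>
              simp only [List.isPrefixOf, List.length_singleton]
              rw [if_neg (by omega : ¬ (m + 1 = 0))]
              by_cases hc : c = '0'
              · rw [if_pos (by simp [hc])]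
                simp only [Nat.add_sub_cancel, List.drop_succ_cons, List.drop_zero]
                rw [ih fuel m [] (cur.reverse :: acc) ht]
                have hne := pvSplit_ne_nil t m
                cases hsp : pvSplit t m with
                | nil => exact absurd hsp hne
                | cons p ps => simp [pvSplit, hc, hsp]
              · rw [if_neg (by simp only [Bool.and_true, beq_iff_eq]; exact fun h => hc h.symm)]
                rw [ih fuel (m + 1) (c :: cur) acc ht]
                have hne := pvSplit_ne_nil t (m + 1)
                cases hsp : pvSplit t (m + 1) with
                | nil => exact absurd hsp hne
                | cons p ps => simp [pvSplit, hc, hsp]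

theorem pvSplitOnMax_eq (l : List Char) (m : Int) (hm : 0 ≤ m) :
    PySem.Chars.splitOnMax l ['0'] m = pvSplit l m.toNat := by
  unfold PySem.Chars.splitOnMax
  rw [if_neg (by omega)]
  rw [pvGoSpec l (l.length + 1) m.toNat [] [] (by omega)]
  have hne := pvSplit_ne_nil l m.toNat
  cases hsp : pvSplit l m.toNat with
  | nil => exact absurd hsp hne
  | cons p ps => simp

-- PySem.Chars.count with a singleton pattern is List.count
theorem pvCountGo (l : List Char) : ∀ (fuel acc : Nat), l.length ≤ fuel →
    PySem.Chars.count.go ['0'] fuel l acc = acc + l.count '0' := by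
  induction l with
  | nil =>
      intro fuel acc hf
      rw [PySem.Chars.count.go.eq_def]
      cases fuel <;> simp
  | cons c t ih =>
      intro fuel acc hf
      cases fuel with
      | zero => simp at hf
      | succ fuel =>
          have ht : t.length ≤ fuel := by simp at hf; omega
          rw [PySem.Chars.count.go.eq_def]
          by_cases hc : c = '0'
          · have hpre : List.isPrefixOf ['0'] (c :: t) = true := by
              simp [List.isPrefixOf, hc]
            simp only [hpre, if_true, List.length_singleton, List.drop_succ_cons, List.drop_zero]
            rw [ih fuel (acc + 1) ht]
            simp [List.count_cons, hc]
            omega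
          · have hpre : List.isPrefixOf ['0'] (c :: t) = false := by
              simp [List.isPrefixOf]
              intro h; exact absurd h.symm hc
            simp only [hpre, Bool.false_eq_true, if_false]
            rw [ih fuel acc ht]
            simp [List.count_cons, hc]

theorem pvCount_singleton (l : List Char) :
    PySem.Chars.count l ['0'] = l.count '0' := by
  unfold PySem.Chars.count
  simp only [List.isEmpty_cons, Bool.false_eq_true, if_false]
  simpa using pvCountGo l l.length 0 le_rfl

-- join ['1'] unfolds on a cons
theorem pvJoin_cons (a : List Char) (bs : List (List Char)) (hbs : bs ≠ []) :
    PySem.Chars.join ['1'] (a :: bs) = a ++ '1' :: PySem.Chars.join ['1'] bs := by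
  cases bs with
  | nil => exact absurd rfl hbs
  | cons b t =>
      simp [PySem.Chars.join, List.intercalate, List.intersperse]

-- when no flip can happen, pvBuild is all '0'
theorem pvBuild_zeros (l : List Char) (k : Int) (h : k ≤ 0 ∨ l.count '0' = 0) :
    pvBuild l k = List.replicate l.length '0' := by
  induction l generalizing k with
  | nil => simp [pvBuild]
  | cons c t ih =>
      have hcond : ¬ (c = '0' ∧ k > 0) := by
        rcases h with h | h
        · rintro ⟨_, hk⟩; omega
        · rintro ⟨hc, _⟩
          simp [List.count_cons, hc] at h
      simp only [pvBuild, if_neg hcond, List.length_cons, List.replicate_succ]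
      congr 1
      apply ih
      rcases h with h | h
      · exact Or.inl h
      · right
        simp [List.count_cons] at h
        omega

-- main correspondence: B's split-render-join equals pvBuild
theorem pvMain (l : List Char) : ∀ (k : Int),
    PySem.Chars.join ['1']
      ((pvSplit l (min (max k 0).toNat (l.count '0'))).map (fun p => List.replicate p.length '0'))
      = pvBuild l k := by
  induction l with
  | nil =>
      intro k
      simp [pvSplit, pvBuild, PySem.Chars.join, List.intercalate]
  | cons c t ih =>
      intro k
      by_cases hc : c = '0'
      · have hcnt : (c :: t).count '0' = t.count '0' + 1 := by simp [List.count_cons, hc]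
        by_cases hk : k > 0
        · have hm : min (max k 0).toNat ((c :: t).count '0')
              = min (max (k - 1) 0).toNat (t.count '0') + 1 := by
            rw [hcnt]; omega
          rw [hm]
          simp only [pvSplit, if_pos hc, List.map_cons]
          have hne : (pvSplit t (min (max (k - 1) 0).toNat (t.count '0'))).map
              (fun p => List.replicate p.length '0') ≠ [] := by
            simp [pvSplit_ne_nil]
          rw [pvJoin_cons _ _ hne, ih (k - 1)]
          simp [pvBuild, hc, hk]
        · have hm : min (max k 0).toNat ((c :: t).count '0') = 0 := by omega
          rw [hm]
          simp only [pvSplit, List.map_cons, List.map_nil]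
          rw [show PySem.Chars.join ['1'] [List.replicate (c :: t).length '0']
              = List.replicate (c :: t).length '0' by
            simp [PySem.Chars.join, List.intercalate, List.intersperse]]
          rw [pvBuild_zeros (c :: t) k (Or.inl (by omega))]
      · have hcnt : (c :: t).count '0' = t.count '0' := by simp [List.count_cons, hc]
        have hm : min (max k 0).toNat ((c :: t).count '0') = min (max k 0).toNat (t.count '0') := by
          rw [hcnt]
        rw [hm]
        set m := min (max k 0).toNat (t.count '0') with hmdef
        cases hm0 : m with
        | zero =>
            simp only [pvSplit, List.map_cons, List.map_nil]
            rw [show PySem.Chars.join ['1'] [List.replicate (c :: t).length '0']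
                = List.replicate (c :: t).length '0' by
              simp [PySem.Chars.join, List.intercalate, List.intersperse]]
            have h0 : k ≤ 0 ∨ (c :: t).count '0' = 0 := by
              rcases Nat.min_eq_zero_iff.mp (hmdef ▸ hm0) with h | h
              · left; omega
              · right; rw [hcnt]; exact h
            rw [pvBuild_zeros (c :: t) k h0]
        | succ m' =>
            have hne := pvSplit_ne_nil t (m' + 1)
            cases hsp : pvSplit t (m' + 1) with
            | nil => exact absurd hsp hne
            | cons p ps =>
                simp only [pvSplit, if_neg hc, hsp, List.map_cons]
                have step : PySem.Chars.join ['1']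
                    (List.replicate (c :: p).length '0' :: ps.map (fun p => List.replicate p.length '0'))
                    = '0' :: PySem.Chars.join ['1']
                        (List.replicate p.length '0' :: ps.map (fun p => List.replicate p.length '0')) := by
                  cases hps : ps with
                  | nil => simp [PySem.Chars.join, List.intercalate, List.length_cons,
                      List.replicate_succ]
                  | cons q qs =>
                      rw [pvJoin_cons _ _ (by simp), pvJoin_cons _ _ (by simp)]
                      simp [List.length_cons, List.replicate_succ]
                rw [step]
                have ih' := ih k
                rw [← hmdef, hm0, hsp, List.map_cons] at ih'
                rw [ih']
                simp [pvBuild, hc]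

-- ===== VERDICT (by name: the statement is the Claim_ definition above) =====
theorem maxXorValue_spec : Claim_equal_maxXorValue := by
  intro x k _
  unfold Spec_maxXorValue maxXorValue maxXorValue_alt
  simp only []
  set s := PySem.Int.toChars x with hs
  rw [PySem.List.foldl_pyRange_zero_pyGetD' s ' '
      (fun (st : List Char × Int) a =>
        if a = '0' ∧ st.2 > 0 then (st.1 ++ ['1'], st.2 - 1) else (st.1 ++ ['0'], st.2)) ([], k)]
  rw [pvFoldA s [] k]
  rw [pvCount_singleton s]
  rw [pvSplitOnMax_eq s (min (max k 0) (s.count '0' : Int)) (by omega)]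
  have hmt : (min (max k 0) ((s.count '0' : Nat) : Int)).toNat
      = min (max k 0).toNat (s.count '0') := by omega
  rw [hmt]
  have hrep : (pvSplit s (min (max k 0).toNat (s.count '0'))).map
        (fun p => PySem.List.pyRepeat ['0'] (p.length : Int))
      = (pvSplit s (min (max k 0).toNat (s.count '0'))).map
        (fun p => List.replicate p.length '0') := by
    apply List.map_congr_left
    intro p _
    rw [PySem.List.pyRepeat_singleton]
    simp
  rw [hrep, pvMain s k]
  simp
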